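-- pv_equiv track=rewrite | github.com/anant123490/live-face-movement-using-cnn-and-lstm | ml/app.py | summarize_detected_items
-- ===== SOURCE A (Python) =====
-- def summarize_detected_items(details):
--     if not details:
--         return "none"
--     counts = {}
--     for item in details:
--         label = item["label"]
--         counts[label] = counts.get(label, 0) + 1
--     ordered = sorted(counts.items(), key=lambda x: x[0])
--     return ", ".join(f"{count} {label}" for label, count in ordered)
-- ===== SOURCE B (Python) =====
-- def summarize_detected_items(details):
--     if not details:
--         return "none"
--     labels = sorted(item["label"] for item in details)
--     parts = []
--     i, n = 0, len(labels)
--     while i < n: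
--         j = i + 1
--         while j < n and labels[j] == labels[i]:
--             j += 1
--         parts.append(f"{j - i} {labels[i]}")
--         i = j
--     return ", ".join(parts)
-- ===== Notes on version B (the rewrite author's own statement) =====
-- stated objective: alternative
-- what changed: B sorts all labels first and counts each equal-label run in one scan over the sorted list, instead of A's dict-counting pass followed by sorting the distinct keys.
import Mathlib
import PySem

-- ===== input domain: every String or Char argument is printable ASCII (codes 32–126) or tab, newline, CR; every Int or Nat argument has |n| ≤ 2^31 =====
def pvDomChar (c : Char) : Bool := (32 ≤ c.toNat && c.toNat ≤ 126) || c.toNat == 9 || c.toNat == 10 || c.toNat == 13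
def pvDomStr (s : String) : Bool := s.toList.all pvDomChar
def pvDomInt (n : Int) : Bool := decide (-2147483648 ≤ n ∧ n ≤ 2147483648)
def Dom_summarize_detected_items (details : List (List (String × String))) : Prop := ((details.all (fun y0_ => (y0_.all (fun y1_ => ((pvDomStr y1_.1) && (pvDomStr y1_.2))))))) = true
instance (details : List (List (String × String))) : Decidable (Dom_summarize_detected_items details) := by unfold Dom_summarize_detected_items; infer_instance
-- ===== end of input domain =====

-- B replaces A's dict-counting pass followed by sorting the distinct keys with
-- sorting all labels first and counting runs in one scan (same cost, different decomposition).

-- ===== PORT A =====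
def summarize_detected_items (details : List (List (String × String))) : String :=
  if details = [] then "none"
  else
    let counts := details.foldl
      (fun (d : PySem.Dict String Int) item =>
        match (PySem.Dict.mk item).get? "label" with
        | some label => d.insert label (d.getD label 0 + 1)
        | none => d)   -- none = KeyError in Python; excluded by Pre_
      PySem.Dict.empty
    let ordered := PySem.List.sorted counts.items (fun x => x.1) false
    PySem.Str.join ", " (ordered.map (fun p => PySem.Int.toStr p.2 ++ " " ++ p.1))

-- ===== PORT B =====
-- the run scan over the sorted label list (B's while/while loops)
def pvRuns : List String → List (String × Int)
  | [] => []
  | x :: xs =>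
    (x, ((xs.takeWhile (fun y => y == x)).length : Int) + 1) ::
      pvRuns (xs.dropWhile (fun y => y == x))
termination_by l => l.length
decreasing_by
  simpa using Nat.lt_succ_of_le (List.Sublist.length_le (List.dropWhile_sublist _))

def summarize_detected_items_alt (details : List (List (String × String))) : String :=
  if details = [] then "none"
  else
    let labels := PySem.List.sorted
      (details.map (fun item => (((PySem.Dict.mk item).get? "label").getD "")))
      (fun x => x) false
    PySem.Str.join ", " ((pvRuns labels).map (fun p => PySem.Int.toStr p.2 ++ " " ++ p.1))

-- ===== PRECONDITION & SPEC =====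
-- Pre_ excludes exactly the inputs where some item lacks the key "label": there Python A raises KeyError.
def Pre_summarize_detected_items (details : List (List (String × String))) : Prop :=
  (details.all (fun item => ((PySem.Dict.mk item).get? "label").isSome)) = true
instance (details : List (List (String × String))) : Decidable (Pre_summarize_detected_items details) := by unfold Pre_summarize_detected_items; infer_instance
def pvWitness_summarize_detected_items : (List (List (String × String))) := [[("label", "cat")], [("label", "dog"), ("score", "1")]]

def Spec_summarize_detected_items (details : List (List (String × String))) (out : String) : Prop := out = summarize_detected_items_alt details
instance (details : List (List (String × String))) (out : String) : Decidable (Spec_summarize_detected_items details out) := by unfold Spec_summarize_detected_items; infer_instance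

-- ===== CLAIM (what is proved, stated in full; the proofs are below) =====
def Claim_equal_summarize_detected_items : Prop := ∀ (details : List (List (String × String))), Dom_summarize_detected_items details → Pre_summarize_detected_items details → Spec_summarize_detected_items details (summarize_detected_items details)

-- ===== LEMMAS AND PROOFS =====

-- the label of an item, as B computes it (= what A reads when the key is present)
def pvLab (item : List (String × String)) : String := (((PySem.Dict.mk item).get? "label").getD "")

-- elements dropped-into rest are strictly above x on a sorted list
lemma pvRest_gt {x : String} {xs : List String}
    (hs : (x :: xs).Pairwise (· ≤ ·)) :
    ∀ y ∈ xs.dropWhile (fun y => y == x), x < y := by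
  intro y hy
  have hsub : (xs.dropWhile (fun y => y == x)).Sublist xs := List.dropWhile_sublist _
  have hle : x ≤ y := (List.pairwise_cons.mp hs).1 y (hsub.mem hy)
  rcases eq_or_lt_of_le hle with heq | hlt
  · exfalso
    -- x ∈ rest: contradict the head of dropWhile
    subst heq
    rcases hrest : xs.dropWhile (fun y => y == x) with _ | ⟨h, t⟩
    · simp [hrest] at hy
    · have hhne : ¬ (h == x) = true := by
        have := List.head_dropWhile_not (p := fun y => y == x) (l := xs)
        simp only [hrest] at this
        simpa using this (by simp)
      have hhx : h ∈ xs := hsub.mem (by simp [hrest])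
      have hxh : x ≤ h := (List.pairwise_cons.mp hs).1 h hhx
      have hrs : (h :: t).Pairwise (· ≤ ·) :=
        hrest ▸ ((List.pairwise_cons.mp hs).2.sublist hsub)
      rw [hrest] at hy
      rcases List.mem_cons.mp hy with h1 | h1
      · exact hhne (by simp [h1])
      · have : h ≤ x := (List.pairwise_cons.mp hrs).1 x h1
        exact hhne (by simp [le_antisymm this hxh])
  · exact hlt

lemma pvRuns_spec (ls : List String) (hs : ls.Pairwise (· ≤ ·)) :
    (∀ p ∈ pvRuns ls, p = (p.1, (ls.count p.1 : Int)) ∧ p.1 ∈ ls) ∧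
    (pvRuns ls).Pairwise (fun a b => a.1 < b.1) ∧
    (∀ y ∈ ls, ∃ p ∈ pvRuns ls, p.1 = y) := by
  induction ls using pvRuns.induct with
  | case1 => simp [pvRuns]
  | case2 x xs ih =>
    set run := xs.takeWhile (fun y => y == x) with hrun
    set rest := xs.dropWhile (fun y => y == x) with hrest
    have hxr : xs = run ++ rest := (List.takeWhile_append_dropWhile).symm
    have hgt : ∀ y ∈ rest, x < y := pvRest_gt hs
    have hrs : rest.Pairwise (· ≤ ·) :=
      (List.pairwise_cons.mp hs).2.sublist (List.dropWhile_sublist _)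
    obtain ⟨ih1, ih2, ih3⟩ := ih hrs
    have hrunx : ∀ y ∈ run, y = x := by
      intro y hy
      simpa using List.mem_takeWhile_imp (l := xs) (p := fun y => y == x) hy
    have hcx : (x :: xs).count x = run.length + 1 := by
      have h1 : run.count x = run.length := List.count_eq_length.mpr (by
        intro y hy; simp [hrunx y hy])
      have h2 : rest.count x = 0 := List.count_eq_zero.mpr (by
        intro hx; exact absurd (hgt x hx) (lt_irrefl x))
      rw [List.count_cons_self, hxr, List.count_append, h1, h2]
    have hck : ∀ k ∈ rest, (x :: xs).count k = rest.count k := by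
      intro k hk
      have hkx : k ≠ x := fun h => absurd (h ▸ hgt k hk) (lt_irrefl x)
      have h1 : run.count k = 0 := List.count_eq_zero.mpr (by
        intro hky; exact hkx (hrunx k hky))
      rw [hxr]
      simp [List.count_append, h1, Ne.symm hkx]
    refine ⟨?_, ?_, ?_⟩
    · intro p hp
      rw [pvRuns] at hp
      rcases List.mem_cons.mp hp with h1 | h1
      · subst h1; simp [hcx, hrun]
      · obtain ⟨he, hm⟩ := ih1 p h1
        refine ⟨?_, List.mem_cons_of_mem _ (hxr ▸ List.mem_append_right _ hm)⟩
        rw [he]; simp [hck p.1 hm]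
    · rw [pvRuns]
      refine List.pairwise_cons.mpr ⟨?_, ih2⟩
      intro p hp
      exact hgt p.1 (ih1 p hp).2
    · intro y hy
      rcases List.mem_cons.mp hy with h1 | h1
      · exact ⟨_, by rw [pvRuns]; exact List.mem_cons_self, by simp [h1]⟩
      · rw [hxr] at h1
        rcases List.mem_append.mp h1 with h2 | h2
        · exact ⟨_, by rw [pvRuns]; exact List.mem_cons_self, by simp [hrunx y h2]⟩
        · obtain ⟨p, hp, hpe⟩ := ih3 y h2
          exact ⟨p, by rw [pvRuns]; exact List.mem_cons_of_mem _ hp, hpe⟩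

-- pvRuns of the sorted label list is exactly A's sorted counter items
lemma pvRuns_eq_sorted_items (L : List String) :
    PySem.List.sorted ((PySem.Dict.counter L).items) (fun x => x.1) false
      = pvRuns (PySem.List.sorted L (fun x => x) false) := by
  set S := PySem.List.sorted L (fun x => x) false with hS
  have hSL : S.Perm L := PySem.List.sorted_perm L (fun x => x) false
  have hSp : S.Pairwise (· ≤ ·) := by
    simpa using PySem.List.sorted_pairwise (xs := L) (key := fun x => x)
  obtain ⟨h1, h2, h3⟩ := pvRuns_spec S hSp
  -- keys of pvRuns S
  have hknd : ((pvRuns S).map (·.1)).Nodup := by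
    refine (List.pairwise_map).mpr ?_
    exact h2.imp (fun h => ne_of_lt h)
  have hkmem : ∀ k, k ∈ (pvRuns S).map (·.1) ↔ k ∈ PySem.Set.ofList L := by
    intro k
    rw [PySem.Set.mem_ofList]
    constructor
    · intro hk
      obtain ⟨p, hp, he⟩ := List.mem_map.mp hk
      exact hSL.mem_iff.mp (he ▸ (h1 p hp).2)
    · intro hk
      obtain ⟨p, hp, he⟩ := h3 k (hSL.mem_iff.mpr hk)
      exact List.mem_map.mpr ⟨p, hp, he⟩
  have hkperm : ((pvRuns S).map (·.1)).Perm (PySem.Set.ofList L) :=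
    (List.perm_ext_iff_of_nodup hknd (PySem.Set.nodup_ofList L)).mpr hkmem
  -- pvRuns S as a map over its keys
  have hself : pvRuns S = ((pvRuns S).map (·.1)).map (fun k => (k, (L.count k : Int))) := by
    rw [List.map_map]
    conv_lhs => rw [← List.map_id (pvRuns S)]
    refine List.map_congr_left ?_
    intro p hp
    have := (h1 p hp).1
    simp only [id, Function.comp]
    rw [this]
    simp [hSL.count_eq]
  have hperm : (pvRuns S).Perm ((PySem.Set.ofList L).map (fun k => (k, (L.count k : Int)))) := by
    rw [hself]; exact hkperm.map _
  refine PySem.List.sorted_eq_of_perm_of_pairwise_lt _ _ _ ?_ h2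
  rw [PySem.Dict.items_counter]
  exact hperm

-- A's counting fold is Counter of the label list, under Pre_
lemma pvCounts_eq (details : List (List (String × String)))
    (hp : Pre_summarize_detected_items details) :
    details.foldl
      (fun (d : PySem.Dict String Int) item =>
        match (PySem.Dict.mk item).get? "label" with
        | some label => d.insert label (d.getD label 0 + 1)
        | none => d)
      PySem.Dict.empty
      = PySem.Dict.counter (details.map pvLab) := by
  rw [← PySem.Dict.foldl_insert_getD_add_one_eq_counter, List.foldl_map]
  refine PySem.List.foldl_congr_mem _ _ _ _ ?_
  intro acc item hm
  have : ((PySem.Dict.mk item).get? "label").isSome := by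
    have := List.all_eq_true.mp hp item hm
    simpa using this
  obtain ⟨v, hv⟩ := Option.isSome_iff_exists.mp this
  simp [hv, pvLab]

-- ===== VERDICT (by name: the statement is the Claim_ definition above) =====
theorem summarize_detected_items_spec : Claim_equal_summarize_detected_items := by
  intro details _ hpre
  unfold Spec_summarize_detected_items summarize_detected_items summarize_detected_items_alt
  by_cases hd : details = []
  · simp [hd]
  · simp only [hd, ite_false]
    rw [pvCounts_eq details hpre, pvRuns_eq_sorted_items]
    rfl
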